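-- pv_equiv track=rewrite | github.com/FusionX9000/Advent-of-Code-2020 | solutions/Day17.py | neighbors_1
-- ===== SOURCE A (Python) =====
-- from itertools import product
--
-- def get_range(space):
--     res = list()
--     while space and isinstance(space, list):
--         res.append(len(space))
--         space = space[0]
--     return reversed(res)
--
-- def neighbors_1(space, x, y, z):
--     X, Y, Z = get_range(space)
--
--     dirs = (-1, 0, 1)
--
--     for dx, dy, dz in product(dirs, dirs, dirs):
--         if dx == 0 and dy == 0 and dz == 0:
--             continue
--         nx, ny, nz = dx+x, dy+y, dz+z
--         if 0 <= nx < X and 0 <= ny < Y and 0 <= nz < Z: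
--             yield nx, ny, nz
-- ===== SOURCE B (Python) =====
-- def get_range(space):
--     res = list()
--     while space and isinstance(space, list):
--         res.append(len(space))
--         space = space[0]
--     return reversed(res)
--
--
-- def box(dims):
--     # recursively enumerate, in lexicographic order, every cell of the clamped
--     # in-bounds box described by dims = [(pos, size), ...] (any dimension)
--     if not dims:
--         yield ()
--         return
--     p, n = dims[0]
--     for c in range(max(0, p - 1), min(n, p + 2)):
--         for rest in box(dims[1:]):
--             yield (c,) + rest
--
--
-- def neighbors_1(space, x, y, z):
--     X, Y, Z = get_range(space)
--     center = (x, y, z)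
--     for cell in box([(x, X), (y, Y), (z, Z)]):
--         if cell != center:
--             yield cell
-- ===== Notes on version B (the rewrite author's own statement) =====
-- stated objective: alternative
-- what changed: B replaces A's fixed 27-offset product-and-bounds-filter loop by a recursive, dimension-generic enumerator box(dims) that builds the clamped in-bounds neighborhood box one axis at a time (recursion over the list of (pos,size) pairs), then skips only the center cell; no bounds test or offset table remains.
import Mathlib
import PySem

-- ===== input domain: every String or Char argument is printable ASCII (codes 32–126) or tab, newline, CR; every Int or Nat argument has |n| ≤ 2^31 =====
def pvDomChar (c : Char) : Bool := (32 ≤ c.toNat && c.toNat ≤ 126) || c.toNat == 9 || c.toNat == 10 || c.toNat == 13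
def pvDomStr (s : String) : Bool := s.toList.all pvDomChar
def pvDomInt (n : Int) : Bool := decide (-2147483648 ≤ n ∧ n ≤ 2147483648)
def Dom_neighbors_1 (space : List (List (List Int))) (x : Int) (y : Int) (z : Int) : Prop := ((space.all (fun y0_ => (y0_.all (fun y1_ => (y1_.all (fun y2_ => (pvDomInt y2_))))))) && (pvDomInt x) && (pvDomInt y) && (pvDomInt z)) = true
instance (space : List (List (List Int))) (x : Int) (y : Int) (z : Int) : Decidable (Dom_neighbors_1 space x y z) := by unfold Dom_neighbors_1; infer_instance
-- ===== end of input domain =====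

-- B replaces A's 27-offset product-and-filter loop by a recursive, dimension-generic
-- enumerator of the clamped in-bounds box, skipping only the center ('alternative').
-- Both functions are Python generators; we port the sequence of yielded tuples.

-- ===== PORT A =====
-- Literal port of get_range: the while loop is unrolled over the static nesting depth
-- (each level is statically a list, the innermost element is an int, so at most three
-- lengths are appended); `none` means the unpacking `X, Y, Z = get_range(space)` raises
-- ValueError (fewer than three entries because some level is empty).  reversed(res)
-- makes X = len(space[0][0]), Y = len(space[0]), Z = len(space).
def getRangeA (space : List (List (List Int))) : Option (Int × Int × Int) :=
  match space with
  | [] => none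
  | l2 :: _ =>
    match l2 with
    | [] => none
    | l1 :: _ =>
      match l1 with
      | [] => none
      | _ :: _ => some ((l1.length : Int), (l2.length : Int), (space.length : Int))

-- one step of A's for-loop over product(dirs, dirs, dirs), accumulating the yields
def stepA (X Y Z x y z : Int) (acc : List (Int × Int × Int)) (t : Int × Int × Int) :
    List (Int × Int × Int) :=
  match t with
  | (dx, dy, dz) =>
    if dx = 0 ∧ dy = 0 ∧ dz = 0 then acc
    else
      if (0 ≤ dx + x ∧ dx + x < X) ∧ (0 ≤ dy + y ∧ dy + y < Y) ∧ (0 ≤ dz + z ∧ dz + z < Z)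
      then acc ++ [(dx + x, dy + y, dz + z)]
      else acc

def neighbors_1 (space : List (List (List Int))) (x : Int) (y : Int) (z : Int) :
    List (Int × Int × Int) :=
  match getRangeA space with
  | none => []  -- Python raises here; excluded by Pre_neighbors_1
  | some (X, Y, Z) =>
    let dirs : List Int := [-1, 0, 1]
    -- product(dirs, dirs, dirs), then the loop body
    (dirs.flatMap fun dx => dirs.flatMap fun dy => dirs.map fun dz => (dx, dy, dz)).foldl
      (stepA X Y Z x y z) []

-- ===== PORT B =====
-- B keeps get_range unchanged (same helper, ported again for B's side)
def getRangeB (space : List (List (List Int))) : Option (Int × Int × Int) :=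
  match space with
  | [] => none
  | l2 :: _ =>
    match l2 with
    | [] => none
    | l1 :: _ =>
      match l1 with
      | [] => none
      | _ :: _ => some ((l1.length : Int), (l2.length : Int), (space.length : Int))

-- Source B's recursive box(dims): cells of the clamped box, one axis per recursive level;
-- a Python tuple of varying length is ported as List Int
def boxB : List (Int × Int) → List (List Int)
  | [] => [[]]
  | (p, n) :: rest =>
    (PySem.List.pyRange (max 0 (p - 1)) (min n (p + 2)) 1).flatMap fun c =>
      (boxB rest).map fun t => c :: t

def neighbors_1_alt (space : List (List (List Int))) (x : Int) (y : Int) (z : Int) :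
    List (Int × Int × Int) :=
  match getRangeB space with
  | none => []  -- Python raises here; excluded by Pre_neighbors_1
  | some (X, Y, Z) =>
    (boxB [(x, X), (y, Y), (z, Z)]).flatMap fun cell =>
      match cell with
      | [a, b, c] => if (a, b, c) = (x, y, z) then [] else [(a, b, c)]  -- cell != center / yield
      | _ => []  -- unreachable: box over three dims yields length-3 cells

-- ===== PRECONDITION & SPEC =====
-- Pre_ excludes exactly the inputs where `X, Y, Z = get_range(space)` raises ValueError
-- (some nesting level empty, so fewer than three lengths are collected).
def Pre_neighbors_1 (space : List (List (List Int))) (x : Int) (y : Int) (z : Int) : Prop :=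
  space ≠ [] ∧ space.headD [] ≠ [] ∧ (space.headD []).headD [] ≠ []
instance (space : List (List (List Int))) (x : Int) (y : Int) (z : Int) : Decidable (Pre_neighbors_1 space x y z) := by unfold Pre_neighbors_1; infer_instance

def pvWitness_neighbors_1 : List (List (List Int)) × Int × Int × Int := ([[[1]]], 0, 0, 0)

def Spec_neighbors_1 (space : List (List (List Int))) (x : Int) (y : Int) (z : Int) (out : List (Int × Int × Int)) : Prop := out = neighbors_1_alt space x y z
instance (space : List (List (List Int))) (x : Int) (y : Int) (z : Int) (out : List (Int × Int × Int)) : Decidable (Spec_neighbors_1 space x y z out) := by unfold Spec_neighbors_1; infer_instance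

-- ===== CLAIM (what is proved, stated in full; the proofs are below) =====
def Claim_equal_neighbors_1 : Prop := ∀ (space : List (List (List Int))) (x : Int) (y : Int) (z : Int), Dom_neighbors_1 space x y z → Pre_neighbors_1 space x y z → Spec_neighbors_1 space x y z (neighbors_1 space x y z)

-- ===== LEMMAS AND PROOFS =====

theorem append_congr {a : Type} {p q r s : List a} (h1 : p = r) (h2 : q = s) :
    p ++ q = r ++ s := by rw [h1, h2]

theorem flatMap_eq_nil' {a b : Type} {l : List a} {f : a → List b}
    (h : ∀ t ∈ l, f t = []) : l.flatMap f = [] := by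
  induction l with
  | nil => rfl
  | cons t l ih =>
    simp only [List.flatMap_cons, h t (by simp), List.nil_append]
    exact ih (fun u hu => h u (by simp [hu]))

-- filtering a unit-step range by membership in [l, u) clamps its endpoints
theorem filter_pyRange_aux (n : Nat) : ∀ (l u a b : Int), (b - a).toNat = n →
    (PySem.List.pyRange a b 1).filter (fun m => decide (l ≤ m ∧ m < u))
      = PySem.List.pyRange (max l a) (min u b) 1 := by
  induction n with
  | zero =>
    intro l u a b h
    rw [PySem.List.pyRange_one_eq_nil (by omega), PySem.List.pyRange_one_eq_nil (by omega)]
    rfl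
  | succ n ih =>
    intro l u a b h
    have hab : a < b := by omega
    rw [PySem.List.pyRange_one_cons hab, List.filter_cons, ih l u (a + 1) b (by omega)]
    by_cases hla : l ≤ a ∧ a < u
    · rw [if_pos (by simpa using hla)]
      have h1 : max l a = a := by omega
      have h2 : max l (a + 1) = a + 1 := by omega
      rw [h1, h2, ← PySem.List.pyRange_one_cons (show a < min u b by omega)]
    · rw [if_neg (by simpa using hla)]
      rcases not_and_or.mp hla with hl | hu
      · have : max l (a + 1) = max l a := by omega
        rw [this]
      · rw [PySem.List.pyRange_one_eq_nil (by omega),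
            PySem.List.pyRange_one_eq_nil (by omega)]

-- B's clamped range = the three candidate coordinates, filtered to be in bounds
theorem range_eq_filter (p N : Int) :
    PySem.List.pyRange (max 0 (p - 1)) (min N (p + 2)) 1
      = [p - 1, p, p + 1].filter (fun n => decide (0 ≤ n ∧ n < N)) := by
  rw [← filter_pyRange_aux 3 0 N (p - 1) (p + 2) (by omega)]
  congr 1
  rw [PySem.List.pyRange_one_cons (by omega), PySem.List.pyRange_one_cons (by omega),
      PySem.List.pyRange_one_cons (by omega), PySem.List.pyRange_one_eq_nil (by omega)]
  have h1 : p - 1 + 1 = p := by ring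
  rw [h1]

-- A's loop, folded from the empty accumulator, is a flatMap of its per-triple yields
theorem foldl_stepA (X Y Z x y z : Int) (L : List (Int × Int × Int))
    (acc : List (Int × Int × Int)) :
    L.foldl (stepA X Y Z x y z) acc = acc ++ L.flatMap (fun t => stepA X Y Z x y z [] t) := by
  induction L generalizing acc with
  | nil => simp
  | cons t l ih =>
    obtain ⟨dx, dy, dz⟩ := t
    rw [List.foldl_cons, ih, List.flatMap_cons]
    simp only [stepA]
    split_ifs <;> simp [List.append_assoc]

-- the common absolute-coordinate form both ports reduce to
def emitC (X Y Z x y z nx ny nz : Int) : List (Int × Int × Int) :=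
  if nx = x ∧ ny = y ∧ nz = z then []
  else
    if (0 ≤ nx ∧ nx < X) ∧ (0 ≤ ny ∧ ny < Y) ∧ (0 ≤ nz ∧ nz < Z) then [(nx, ny, nz)] else []

def Cform (X Y Z x y z : Int) : List (Int × Int × Int) :=
  [x - 1, x, x + 1].flatMap fun nx =>
    [y - 1, y, y + 1].flatMap fun ny =>
      [z - 1, z, z + 1].flatMap fun nz => emitC X Y Z x y z nx ny nz

theorem emitC_empty_x (X Y Z x y z nx ny nz : Int) (h : ¬(0 ≤ nx ∧ nx < X)) :
    emitC X Y Z x y z nx ny nz = [] := by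
  unfold emitC; split_ifs with h1 h2
  · rfl
  · exact absurd h2.1 h
  · rfl

theorem emitC_empty_y (X Y Z x y z nx ny nz : Int) (h : ¬(0 ≤ ny ∧ ny < Y)) :
    emitC X Y Z x y z nx ny nz = [] := by
  unfold emitC; split_ifs with h1 h2
  · rfl
  · exact absurd h2.2.1 h
  · rfl

theorem emitC_empty_z (X Y Z x y z nx ny nz : Int) (h : ¬(0 ≤ nz ∧ nz < Z)) :
    emitC X Y Z x y z nx ny nz = [] := by
  unfold emitC; split_ifs with h1 h2
  · rfl
  · exact absurd h2.2.2 h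
  · rfl

theorem flatMap_congr' {a b : Type} {l : List a} {f g : a → List b}
    (h : ∀ t ∈ l, f t = g t) : l.flatMap f = l.flatMap g := by
  induction l with
  | nil => rfl
  | cons t l ih =>
    simp only [List.flatMap_cons]
    rw [h t (by simp), ih (fun u hu => h u (by simp [hu]))]

theorem filter_flatMap_of_empty {b : Type} (P : Int → Prop) [DecidablePred P]
    (f : Int → List b) (h : ∀ n, ¬ P n → f n = []) (l : List Int) :
    (l.filter (fun n => decide (P n))).flatMap f = l.flatMap f := by
  induction l with
  | nil => rfl
  | cons t l ih =>
    rw [List.filter_cons]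
    by_cases hp : P t
    · rw [if_pos (by simpa using hp)]
      simp only [List.flatMap_cons, ih]
    · rw [if_neg (by simpa using hp)]
      simp only [List.flatMap_cons, ih, h t hp, List.nil_append]

-- A's 27-offset loop equals the common form
theorem A_eq_C (X Y Z x y z : Int) :
    (([-1, 0, 1] : List Int).flatMap fun dx =>
        ([-1, 0, 1] : List Int).flatMap fun dy =>
          ([-1, 0, 1] : List Int).map fun dz => (dx, dy, dz)).foldl (stepA X Y Z x y z) []
      = Cform X Y Z x y z := by
  rw [foldl_stepA]
  simp only [List.flatMap_cons, List.flatMap_nil, List.map_cons, List.map_nil,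
    List.append_nil, List.nil_append, stepA, Cform, emitC, List.append_assoc]
  repeat' (apply append_congr)
  all_goals try simp only [List.map_cons, List.map_nil, List.flatten_cons,
    List.flatten_nil, List.append_nil]
  all_goals try dsimp only
  all_goals refine if_congr ?_ rfl (if_congr ?_ ?_ rfl)
  all_goals try simp only [List.cons.injEq, Prod.mk.injEq, and_true, eq_self_iff_true,
    true_and, and_self]
  all_goals try omega

-- one z-row of B, for in-bounds nx and ny, equals one z-row of the common form
theorem B_row_z (X Y Z x y z nx ny : Int) (hx : 0 ≤ nx ∧ nx < X) (hy : 0 ≤ ny ∧ ny < Y) :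
    ([z - 1, z, z + 1].filter (fun n => decide (0 ≤ n ∧ n < Z))).flatMap
        (fun nz => if (nx, ny, nz) = (x, y, z) then [] else [(nx, ny, nz)])
      = [z - 1, z, z + 1].flatMap (fun nz => emitC X Y Z x y z nx ny nz) := by
  have h1 := flatMap_congr' (l := [z - 1, z, z + 1].filter (fun n => decide (0 ≤ n ∧ n < Z)))
    (f := fun nz => if (nx, ny, nz) = (x, y, z) then [] else [(nx, ny, nz)])
    (g := fun nz => emitC X Y Z x y z nx ny nz)
    (fun nz hnz => by
      have hzb : 0 ≤ nz ∧ nz < Z := by simpa using (List.mem_filter.mp hnz).2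
      simp [emitC, Prod.mk.injEq, hx.1, hx.2, hy.1, hy.2, hzb.1, hzb.2])
  rw [h1, filter_flatMap_of_empty (fun n => 0 ≤ n ∧ n < Z) _
    (fun nz hz => emitC_empty_z X Y Z x y z nx ny nz hz)]

-- one y-plane of B, for in-bounds nx, equals one y-plane of the common form
theorem B_plane_y (X Y Z x y z nx : Int) (hx : 0 ≤ nx ∧ nx < X) :
    ([y - 1, y, y + 1].filter (fun n => decide (0 ≤ n ∧ n < Y))).flatMap
        (fun ny => ([z - 1, z, z + 1].filter (fun n => decide (0 ≤ n ∧ n < Z))).flatMap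
          (fun nz => if (nx, ny, nz) = (x, y, z) then [] else [(nx, ny, nz)]))
      = [y - 1, y, y + 1].flatMap
          (fun ny => [z - 1, z, z + 1].flatMap (fun nz => emitC X Y Z x y z nx ny nz)) := by
  have h1 := flatMap_congr' (l := [y - 1, y, y + 1].filter (fun n => decide (0 ≤ n ∧ n < Y)))
    (f := fun ny => ([z - 1, z, z + 1].filter (fun n => decide (0 ≤ n ∧ n < Z))).flatMap
      (fun nz => if (nx, ny, nz) = (x, y, z) then [] else [(nx, ny, nz)]))
    (g := fun ny => [z - 1, z, z + 1].flatMap (fun nz => emitC X Y Z x y z nx ny nz))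
    (fun ny hny => by
      have hyb : 0 ≤ ny ∧ ny < Y := by simpa using (List.mem_filter.mp hny).2
      exact B_row_z X Y Z x y z nx ny hx hyb)
  rw [h1, filter_flatMap_of_empty (fun n => 0 ≤ n ∧ n < Y) _
    (fun ny hy => flatMap_eq_nil' (fun nz _ => emitC_empty_y X Y Z x y z nx ny nz hy))]

-- boxB over the three dimensions, written as nested flatMaps of singleton-building maps
theorem boxB_three (x X y Y z Z : Int) :
    boxB [(x, X), (y, Y), (z, Z)]
      = (PySem.List.pyRange (max 0 (x - 1)) (min X (x + 2)) 1).flatMap fun nx =>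
          (PySem.List.pyRange (max 0 (y - 1)) (min Y (y + 2)) 1).flatMap fun ny =>
            (PySem.List.pyRange (max 0 (z - 1)) (min Z (z + 2)) 1).map fun nz =>
              [nx, ny, nz] := by
  simp only [boxB, List.map_flatMap, List.map_map, Function.comp, List.map_cons,
    List.map_nil]
  refine flatMap_congr' (fun nx _ => flatMap_congr' (fun ny _ => ?_))
  induction (PySem.List.pyRange (max 0 (z - 1)) (min Z (z + 2)) 1) with
  | nil => rfl
  | cons t l ih => simp only [List.flatMap_cons, List.map_cons, ih]; rfl

theorem flatMap_map_general {a b c : Type} (l : List a) (f : a → b) (g : b → List c) :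
    (l.map f).flatMap g = l.flatMap (fun t => g (f t)) := by
  induction l with
  | nil => rfl
  | cons t l ih => simp only [List.map_cons, List.flatMap_cons, ih]

-- B's recursive box with the center skipped equals the common form
theorem B_eq_C (X Y Z x y z : Int) :
    ((boxB [(x, X), (y, Y), (z, Z)]).flatMap fun cell =>
        match cell with
        | [a, b, c] => if (a, b, c) = (x, y, z) then [] else [(a, b, c)]
        | _ => [])
      = Cform X Y Z x y z := by
  rw [boxB_three]
  simp only [List.flatMap_assoc, flatMap_map_general]
  rw [range_eq_filter x X, range_eq_filter y Y, range_eq_filter z Z]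
  have h1 := flatMap_congr' (l := [x - 1, x, x + 1].filter (fun n => decide (0 ≤ n ∧ n < X)))
    (f := fun nx => ([y - 1, y, y + 1].filter (fun n => decide (0 ≤ n ∧ n < Y))).flatMap
      (fun ny => ([z - 1, z, z + 1].filter (fun n => decide (0 ≤ n ∧ n < Z))).flatMap
        (fun nz => if (nx, ny, nz) = (x, y, z) then [] else [(nx, ny, nz)])))
    (g := fun nx => [y - 1, y, y + 1].flatMap
      (fun ny => [z - 1, z, z + 1].flatMap (fun nz => emitC X Y Z x y z nx ny nz)))
    (fun nx hnx => by
      have hxb : 0 ≤ nx ∧ nx < X := by simpa using (List.mem_filter.mp hnx).2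
      exact B_plane_y X Y Z x y z nx hxb)
  rw [h1, filter_flatMap_of_empty (fun n => 0 ≤ n ∧ n < X) _
    (fun nx hx => flatMap_eq_nil'
      (fun ny _ => flatMap_eq_nil' (fun nz _ => emitC_empty_x X Y Z x y z nx ny nz hx)))]
  rfl

-- ===== VERDICT (by name: the statement is the Claim_ definition above) =====
theorem neighbors_1_spec : Claim_equal_neighbors_1 := by
  intro space x y z _ _
  unfold Spec_neighbors_1 neighbors_1 neighbors_1_alt
  rw [show getRangeB space = getRangeA space from rfl]
  rcases hg : getRangeA space with _ | ⟨⟨X, Y, Z⟩⟩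
  · rfl
  · simp only
    rw [A_eq_C, B_eq_C]
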